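-- pv_equiv track=rewrite | github.com/fabioSCarvalho/Bootcamp_Santander2025 | Desafio_clinica_Medica/Ordem_clinica_Medica.py | ordem
-- ===== SOURCE A (Python) =====
-- def ordem(Lista_paciente):
--   paciente_comum = []
--   paciente_por_idade= []
--   paciente_urgente = []
--
--   for paciente in Lista_paciente:
--     if paciente[2] ==  'urgente':
--         paciente_urgente.append(paciente)
--     elif paciente[1] > 60:
--         paciente_por_idade.append(paciente)
--     else:
--         paciente_comum.append(paciente)
--   return paciente_urgente, paciente_por_idade, paciente_comum
-- ===== SOURCE B (Python) =====
-- def _rank(p):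
--     if p[2] == 'urgente':
--         return 0
--     if p[1] > 60:
--         return 1
--     return 2
--
-- def _split_run(s, r):
--     k = 0
--     while k < len(s) and _rank(s[k]) == r:
--         k += 1
--     return s[:k], s[k:]
--
-- def ordem(Lista_paciente):
--     s = sorted(Lista_paciente, key=_rank)
--     paciente_urgente, rest = _split_run(s, 0)
--     paciente_por_idade, paciente_comum = _split_run(rest, 1)
--     return paciente_urgente, paciente_por_idade, paciente_comum
-- ===== Notes on version B (the rewrite author's own statement) =====
-- stated objective: alternative
-- what changed: Replaced the dispatch loop over three accumulators by decorate-stable-sort-split: each patient gets a priority rank, the list is stably sorted by rank, and the sorted list is cut at the two rank boundaries; stability of sorted makes each run equal the corresponding accumulator.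
import Mathlib
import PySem

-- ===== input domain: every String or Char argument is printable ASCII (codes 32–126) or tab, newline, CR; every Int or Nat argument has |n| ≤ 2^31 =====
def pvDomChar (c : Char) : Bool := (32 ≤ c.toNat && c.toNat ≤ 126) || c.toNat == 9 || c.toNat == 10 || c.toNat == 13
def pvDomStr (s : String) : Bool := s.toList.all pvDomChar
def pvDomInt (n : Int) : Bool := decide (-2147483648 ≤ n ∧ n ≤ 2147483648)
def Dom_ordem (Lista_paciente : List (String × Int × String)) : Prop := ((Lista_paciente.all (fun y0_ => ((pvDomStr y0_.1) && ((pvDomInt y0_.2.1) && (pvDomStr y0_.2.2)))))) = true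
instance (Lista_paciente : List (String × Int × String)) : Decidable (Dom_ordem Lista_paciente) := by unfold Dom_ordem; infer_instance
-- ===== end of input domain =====

-- B replaces A's dispatch loop by decorate-stable-sort-split: rank each patient, stable-sort by rank, cut the sorted list at the two rank boundaries (objective: alternative algorithm).

-- ===== PORT A =====
-- single loop over the list, dispatching each patient into one of three accumulators
def ordem (Lista_paciente : List (String × Int × String)) : (List (String × Int × String)) × (List (String × Int × String)) × (List (String × Int × String)) :=
  let st := Lista_paciente.foldl
    (fun (st : (List (String × Int × String)) × (List (String × Int × String)) × (List (String × Int × String))) paciente =>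
      if paciente.2.2 == "urgente" then (st.1, st.2.1, st.2.2 ++ [paciente])
      else if paciente.2.1 > 60 then (st.1, st.2.1 ++ [paciente], st.2.2)
      else (st.1 ++ [paciente], st.2.1, st.2.2))
    ([], [], [])
  (st.2.2, st.2.1, st.1)

-- ===== PORT B =====
-- priority rank: urgent = 0, elderly = 1, common = 2
def pvRank (p : String × Int × String) : Int :=
  if p.2.2 == "urgente" then 0 else if p.2.1 > 60 then 1 else 2

-- the while loop of _split_run: advance past the leading run of rank r, return (run, rest)
def pvSplitRun (s : List (String × Int × String)) (r : Int) : (List (String × Int × String)) × (List (String × Int × String)) :=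
  match s with
  | [] => ([], [])
  | p :: t => if pvRank p == r then
      let z := pvSplitRun t r
      (p :: z.1, z.2)
    else ([], p :: t)

-- stable-sort by rank, then cut at the two rank boundaries
def ordem_alt (Lista_paciente : List (String × Int × String)) : (List (String × Int × String)) × (List (String × Int × String)) × (List (String × Int × String)) :=
  let s := PySem.List.sorted Lista_paciente pvRank false
  let z0 := pvSplitRun s 0
  let z1 := pvSplitRun z0.2 1
  (z0.1, z1.1, z1.2)

-- ===== PRECONDITION & SPEC =====
def Spec_ordem (Lista_paciente : List (String × Int × String)) (out : (List (String × Int × String)) × (List (String × Int × String)) × (List (String × Int × String))) : Prop := out = ordem_alt Lista_paciente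
instance (Lista_paciente : List (String × Int × String)) (out : (List (String × Int × String)) × (List (String × Int × String)) × (List (String × Int × String))) : Decidable (Spec_ordem Lista_paciente out) := by unfold Spec_ordem; infer_instance

-- ===== CLAIM (what is proved, stated in full; the proofs are below) =====
def Claim_equal_ordem : Prop := ∀ (Lista_paciente : List (String × Int × String)), Dom_ordem Lista_paciente → Spec_ordem Lista_paciente (ordem Lista_paciente)

-- ===== LEMMAS AND PROOFS =====

-- A's loop accumulates exactly the three filters
theorem ordem_loop (L : List (String × Int × String)) (c i u : List (String × Int × String)) :
    L.foldl
      (fun (st : (List (String × Int × String)) × (List (String × Int × String)) × (List (String × Int × String))) paciente =>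
        if paciente.2.2 == "urgente" then (st.1, st.2.1, st.2.2 ++ [paciente])
        else if paciente.2.1 > 60 then (st.1, st.2.1 ++ [paciente], st.2.2)
        else (st.1 ++ [paciente], st.2.1, st.2.2))
      (c, i, u)
    = (c ++ L.filter (fun p => pvRank p == 2),
       i ++ L.filter (fun p => pvRank p == 1),
       u ++ L.filter (fun p => pvRank p == 0)) := by
  induction L generalizing c i u with
  | nil => simp
  | cons p L ih =>
    rw [List.foldl_cons]
    by_cases hu : p.2.2 = "urgente"
    · have h0 : pvRank p = 0 := by simp [pvRank, hu]
      rw [if_pos (by simp [hu]), ih]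
      simp [h0]
    · by_cases hi : p.2.1 > 60
      · have h1 : pvRank p = 1 := by simp [pvRank, hu, hi]
        rw [if_neg (by simp [hu]), if_pos hi, ih]
        simp [h1]
      · have h2 : pvRank p = 2 := by simp [pvRank, hu, hi]
        rw [if_neg (by simp [hu]), if_neg hi, ih]
        simp [h2]

theorem insertBy_append_not_before {α : Type} (before : α → α → Bool) (x : α) (a b : List α)
    (ha : ∀ y ∈ a, before x y = false) :
    PySem.List.insertBy before x (a ++ b) = a ++ PySem.List.insertBy before x b := by
  induction a with
  | nil => rfl
  | cons y t ih =>
    rw [List.cons_append, PySem.List.insertBy.eq_def]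
    simp only [ha y (by simp), ih (fun z hz => ha z (by simp [hz]))]
    rfl

theorem mem_filter_rank {r : Int} {L : List (String × Int × String)} {p : String × Int × String}
    (h : p ∈ L.filter (fun q => pvRank q == r)) : pvRank p = r := by
  have := (List.mem_filter.mp h).2
  simpa using this

-- stability: the stable sort by rank is the concatenation of the three rank buckets in list order
theorem sorted_eq_buckets (L : List (String × Int × String)) :
    PySem.List.sorted L pvRank false
      = L.filter (fun p => pvRank p == 0) ++ L.filter (fun p => pvRank p == 1)
          ++ L.filter (fun p => pvRank p == 2) := by
  rw [PySem.List.sorted_eq_foldl_insertBy]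
  induction L using List.reverseRecOn with
  | nil => rfl
  | append_singleton L x ih =>
    rw [List.foldl_append, List.foldl_cons, List.foldl_nil, ih]
    have hrank : pvRank x = 0 ∨ pvRank x = 1 ∨ pvRank x = 2 := by
      unfold pvRank; split_ifs <;> simp
    have hfilter : ∀ r : Int, (L ++ [x]).filter (fun p => pvRank p == r)
        = L.filter (fun p => pvRank p == r) ++ if pvRank x == r then [x] else [] := by
      intro r; rw [List.filter_append]
      by_cases h : pvRank x = r <;> simp [h]
    rcases hrank with h | h | h
    · -- x goes right after bucket 0
      rw [List.append_assoc, insertBy_append_not_before _ x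
          (L.filter (fun p => pvRank p == 0))
          (L.filter (fun p => pvRank p == 1) ++ L.filter (fun p => pvRank p == 2))
          (by intro y hy; have := mem_filter_rank hy; simp [h, this])]
      have : PySem.List.insertBy (fun a b => decide (pvRank a < pvRank b)) x
          (L.filter (fun p => pvRank p == 1) ++ L.filter (fun p => pvRank p == 2))
          = x :: (L.filter (fun p => pvRank p == 1) ++ L.filter (fun p => pvRank p == 2)) := by
        cases hc : L.filter (fun p => pvRank p == 1) ++ L.filter (fun p => pvRank p == 2) with
        | nil => simp [PySem.List.insertBy]
        | cons z w =>
          have hz : z ∈ L.filter (fun p => pvRank p == 1) ++ L.filter (fun p => pvRank p == 2) := by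
            rw [hc]; simp
          have hzr : pvRank z = 1 ∨ pvRank z = 2 := by
            rcases List.mem_append.mp hz with hz1 | hz2
            · exact Or.inl (mem_filter_rank hz1)
            · exact Or.inr (mem_filter_rank hz2)
          have : (decide (pvRank x < pvRank z)) = true := by
            rcases hzr with hz' | hz' <;> simp [h, hz']
          simp [PySem.List.insertBy, this]
      rw [this]
      simp [hfilter, h]
    · -- x goes right after bucket 1
      rw [List.append_assoc, insertBy_append_not_before _ x
          (L.filter (fun p => pvRank p == 0))
          (L.filter (fun p => pvRank p == 1) ++ L.filter (fun p => pvRank p == 2))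
          (by intro y hy; have := mem_filter_rank hy; simp [h, this]),
          insertBy_append_not_before _ x
          (L.filter (fun p => pvRank p == 1))
          (L.filter (fun p => pvRank p == 2))
          (by intro y hy; have := mem_filter_rank hy; simp [h, this])]
      have : PySem.List.insertBy (fun a b => decide (pvRank a < pvRank b)) x
          (L.filter (fun p => pvRank p == 2))
          = x :: L.filter (fun p => pvRank p == 2) := by
        cases hc : L.filter (fun p => pvRank p == 2) with
        | nil => simp [PySem.List.insertBy]
        | cons z w =>
          have hz : pvRank z = 2 := mem_filter_rank (by rw [hc]; simp)
          have : (decide (pvRank x < pvRank z)) = true := by simp [h, hz]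
          simp [PySem.List.insertBy, this]
      rw [this]
      simp [hfilter, h]
    · -- x goes at the very end
      rw [PySem.List.insertBy_of_forall_not_before _ x _
          (by intro y hy
              rcases List.mem_append.mp hy with hy' | hy'
              · rcases List.mem_append.mp hy' with hy'' | hy''
                · have := mem_filter_rank hy''; simp [h, this]
                · have := mem_filter_rank hy''; simp [h, this]
              · have := mem_filter_rank hy'; simp [h, this])]
      simp [hfilter, h]

-- splitting a run: if every element of a has rank r and b does not start with rank r, the split is (a, b)
theorem pvSplitRun_append (a b : List (String × Int × String)) (r : Int)
    (ha : ∀ p ∈ a, pvRank p = r)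
    (hb : ∀ p t, b = p :: t → pvRank p ≠ r) :
    pvSplitRun (a ++ b) r = (a, b) := by
  induction a with
  | nil =>
    cases b with
    | nil => rfl
    | cons p t => simp [pvSplitRun, hb p t rfl]
  | cons p t ih =>
    simp [pvSplitRun, ha p (by simp), ih (fun q hq => ha q (by simp [hq]))]

-- ===== VERDICT (by name: the statement is the Claim_ definition above) =====
theorem ordem_spec : Claim_equal_ordem := by
  intro L _
  unfold Spec_ordem ordem ordem_alt
  rw [ordem_loop, sorted_eq_buckets]
  have h0 : pvSplitRun ((L.filter (fun p => pvRank p == 0) ++ L.filter (fun p => pvRank p == 1))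
      ++ L.filter (fun p => pvRank p == 2)) 0
      = (L.filter (fun p => pvRank p == 0),
         L.filter (fun p => pvRank p == 1) ++ L.filter (fun p => pvRank p == 2)) := by
    rw [List.append_assoc]
    apply pvSplitRun_append
    · intro p hp; exact mem_filter_rank hp
    · intro p t hpt
      have hp : p ∈ L.filter (fun q => pvRank q == 1) ++ L.filter (fun q => pvRank q == 2) := by
        rw [hpt]; simp
      rcases List.mem_append.mp hp with h | h
      · have := mem_filter_rank h; omega
      · have := mem_filter_rank h; omega
  have h1 : pvSplitRun (L.filter (fun p => pvRank p == 1) ++ L.filter (fun p => pvRank p == 2)) 1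
      = (L.filter (fun p => pvRank p == 1), L.filter (fun p => pvRank p == 2)) := by
    apply pvSplitRun_append
    · intro p hp; exact mem_filter_rank hp
    · intro p t hpt
      have hp : p ∈ L.filter (fun q => pvRank q == 2) := by rw [hpt]; simp
      have := mem_filter_rank hp; omega
  simp only [h0, h1, List.nil_append]
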